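-- pv_equiv track=rewrite | github.com/jianhui-ben/leetcode_python | Lintcode 437 copy books.py | copyBooks
-- ===== SOURCE A (Python) =====
-- def copyBooks(pages, k):
--     # write your code here
--
--     if not pages: return 0
--
--     tot_pages = sum(pages)
--     left, right = tot_pages // k if not tot_pages % k else (tot_pages // k) + 1, tot_pages
--
--     ## binary search to search for the last value which complete(pages, k, minute) return true
--     def complete(pages, k, minute):
--         ## 3, 2, 4
--         ## cur_person: 3
--         ## k: 2
--         ## minute: 7
--
--         cur_person = 0
--
--         for page in pages:
--             if page > minute:
--                 return False
--             if cur_person + page <= minute: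
--                 cur_person += page
--             else:
--                 k -= 1
--                 cur_person = page
--             if k < 0:
--                 return False
--         return k >= 1
--
--
--     while left <= right:
--         mid = left + (right - left) // 2
--         if complete(pages, k, mid):
--             right = mid - 1
--         else:
--             left = mid + 1
--
--     return max(left, 1)
-- ===== SOURCE B (Python) =====
-- def copyBooks(pages, k):
--     # Interval DP over suffixes (minimal max load for pages[i:] with j persons)
--     # instead of binary search on the answer.
--     if not pages:
--         return 0
--     n = len(pages)
--     persons = min(k, n)
--     # one person: dp[i] = sum(pages[i:])
--     dp = [0]
--     for p in reversed(pages):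
--         dp.append(p + dp[-1])
--     dp.reverse()
--     for _ in range(persons - 1):       # add one more person per round
--         new = []
--         for i in range(n):
--             cur = 0
--             best = None
--             for p, d in zip(pages[i:], dp[i + 1:]):
--                 cur += p               # first person reads pages[i:t+1]
--                 cand = max(cur, d)     # the others share pages[t+1:]
--                 if best is None or cand < best:
--                     best = cand
--             new.append(best)
--         dp = new + [0]
--     return max(dp[0], 1)
-- ===== Notes on version B (the rewrite author's own statement) =====
-- stated objective: alternative
-- what changed: Replaced the binary search on the answer (with its greedy feasibility check) by the classic interval DP over suffixes: dp[i][j] = min over split points of max(first person's load, dp of the rest), answering dp[0][min(k,n)].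
-- outside the precondition, e.g. on copyBooks([-1, 2], 1): A returns 2, B returns 1; on copyBooks([5], -1): A returns 6, B returns 5; on copyBooks([5], 0): A raises ZeroDivisionError, B returns 5
import Mathlib
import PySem

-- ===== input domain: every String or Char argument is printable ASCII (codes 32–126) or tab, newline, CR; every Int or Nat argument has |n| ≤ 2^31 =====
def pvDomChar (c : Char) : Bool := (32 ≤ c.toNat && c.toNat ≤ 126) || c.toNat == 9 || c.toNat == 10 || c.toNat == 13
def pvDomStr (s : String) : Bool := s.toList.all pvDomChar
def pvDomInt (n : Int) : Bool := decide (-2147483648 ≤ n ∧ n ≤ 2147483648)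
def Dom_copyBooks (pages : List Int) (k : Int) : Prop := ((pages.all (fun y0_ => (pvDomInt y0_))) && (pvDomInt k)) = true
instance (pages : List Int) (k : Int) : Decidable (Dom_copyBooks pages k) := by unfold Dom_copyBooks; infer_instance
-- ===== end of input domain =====

-- B replaces A's binary search on the answer by the classic interval DP over suffixes
-- (dp[i] = minimal possible maximum load for pages[i:] with j persons); same values, no speed claim.

-- ===== PORT A =====
-- the inner helper `complete(pages, k, minute)` of A, with its running `cur_person`
def completeA : List Int → Int → Int → Int → Bool
  | [], k, _, _ => decide (1 ≤ k)
  | p :: ps, k, minute, cur =>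
    if p > minute then false
    else if cur + p ≤ minute then
      (if k < 0 then false else completeA ps k minute (cur + p))
    else
      (if k - 1 < 0 then false else completeA ps (k - 1) minute p)

-- A's `while left <= right` binary-search loop (mid written out in place)
def bsA (pages : List Int) (k : Int) (l r : Int) : Int :=
  if _h : l ≤ r then
    if completeA pages k (l + PySem.Int.floordiv (r - l) 2) 0 then
      bsA pages k l (l + PySem.Int.floordiv (r - l) 2 - 1)
    else
      bsA pages k (l + PySem.Int.floordiv (r - l) 2 + 1) r
  else l
termination_by (r + 1 - l).toNat
decreasing_by
  · have h2 : PySem.Int.floordiv (r - l) 2 = (r - l) / 2 :=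
      PySem.Int.floordiv_eq_ediv_of_pos (by norm_num)
    rw [h2]; omega
  · have h2 : PySem.Int.floordiv (r - l) 2 = (r - l) / 2 :=
      PySem.Int.floordiv_eq_ediv_of_pos (by norm_num)
    rw [h2]; omega

def copyBooks (pages : List Int) (k : Int) : Int :=
  if pages = [] then 0
  else
    let tot := pages.sum
    let left := if PySem.Int.mod tot k = 0 then PySem.Int.floordiv tot k
                else PySem.Int.floordiv tot k + 1
    max (bsA pages k left tot) 1

-- ===== PORT B =====
-- suffix sums: the j = 1 row of the DP (built back to front, as in Source B)
def sufsB : List Int → List Int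
  | [] => [0]
  | p :: ps => (p + (sufsB ps).headI) :: sufsB ps

-- `if best is None or cand < best: best = cand`
def ominB (best : Option Int) (cand : Int) : Option Int :=
  match best with
  | none => some cand
  | some b => if cand < b then some cand else some b

-- `for p, d in zip(pages[i:], dp[i+1:]): cur += p; cand = max(cur, d); …`
def innerB (cur : Int) (best : Option Int) : List Int → List Int → Option Int
  | [], _ => best
  | _ :: _, [] => best
  | p :: ps, d :: ds => innerB (cur + p) (ominB best (max (cur + p) d)) ps ds

-- `for i in range(n): … new.append(best)`  (position i carries the suffix pages[i:])
def rowB : List Int → List Int → List Int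
  | [], _ => []
  | p :: ps, dp => (innerB 0 none (p :: ps) dp.tail).getD 0 :: rowB ps dp.tail

def stepB (pages dp : List Int) : List Int := rowB pages dp ++ [0]

def copyBooks_alt (pages : List Int) (k : Int) : Int :=
  if pages = [] then 0
  else
    let persons := min k (pages.length : Int)
    let dp := (PySem.List.pyRange 0 (persons - 1) 1).foldl
      (fun dp _ => stepB pages dp) (sufsB pages)
    max dp.headI 1

-- ===== PRECONDITION & SPEC =====
-- Pre_ admits the task's natural domain (nonnegative pages, at least one person) plus every
-- nonempty list of nonpositive total; it excludes k = 0 with nonempty pages (A raises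
-- ZeroDivisionError there), k < 0 with nonempty pages, and lists of positive total that
-- contain a negative page — outside the natural domain, where A's greedy check and
-- floor-divided search window make its returned value an accident of the implementation.
def Pre_copyBooks (pages : List Int) (k : Int) : Prop :=
  pages = [] ∨ (1 ≤ k ∧ ((∀ p ∈ pages, 0 ≤ p) ∨ pages.sum ≤ 0))
instance (pages : List Int) (k : Int) : Decidable (Pre_copyBooks pages k) := by
  unfold Pre_copyBooks; infer_instance

def pvWitness_copyBooks : List Int × Int := ([3, 2, 4], 2)

def Spec_copyBooks (pages : List Int) (k : Int) (out : Int) : Prop := out = copyBooks_alt pages k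
instance (pages : List Int) (k : Int) (out : Int) : Decidable (Spec_copyBooks pages k out) := by
  unfold Spec_copyBooks; infer_instance

-- ===== CLAIM (what is proved, stated in full; the proofs are below) =====
def Claim_equal_copyBooks : Prop := ∀ (pages : List Int) (k : Int), Dom_copyBooks pages k →
  Pre_copyBooks pages k → Spec_copyBooks pages k (copyBooks pages k)

-- ===== LEMMAS AND PROOFS =====

-- feasN m j l: pages l can be split into at most j contiguous nonempty groups, each of sum ≤ m
def feasN (m : Int) : Nat → List Int → Prop
  | 0, l => l = []
  | j + 1, l => l = [] ∨ ∃ l1 l2, l = l1 ++ l2 ∧ l1 ≠ [] ∧ l1.sum ≤ m ∧ feasN m j l2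

theorem feas_nil (m : Int) (j : Nat) : feasN m j [] := by
  cases j <;> simp [feasN]

theorem feas_succ {m : Int} {j : Nat} {l : List Int} (h : feasN m j l) : feasN m (j + 1) l := by
  induction j generalizing l with
  | zero => subst h; exact feas_nil m 1
  | succ j ih =>
    rcases h with h | ⟨l1, l2, rfl, h1, h2, h3⟩
    · exact Or.inl h
    · exact Or.inr ⟨l1, l2, rfl, h1, h2, ih h3⟩

theorem feas_mono {m : Int} {j j' : Nat} {l : List Int} (h : feasN m j l) (hj : j ≤ j') :
    feasN m j' l := by
  induction j' with
  | zero =>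
    have hz : j = 0 := by omega
    subst hz; exact h
  | succ j' ih =>
    rcases Nat.lt_or_ge j (j' + 1) with hlt | hge
    · exact feas_succ (ih (by omega))
    · have : j = j' + 1 := by omega
      subst this; exact h

theorem feas_sum {m : Int} (hm : 0 ≤ m) :
    ∀ (j : Nat) (l : List Int), (∀ p ∈ l, 0 ≤ p) → feasN m j l → l.sum ≤ (j : Int) * m := by
  intro j
  induction j with
  | zero => intro l _ h; subst h; simp
  | succ j ih =>
    intro l hl h
    rcases h with h | ⟨l1, l2, rfl, h1, h2, h3⟩
    · subst h; simp; positivity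
    · have hl2 : ∀ p ∈ l2, 0 ≤ p := fun p hp => hl p (by simp [hp])
      have := ih l2 hl2 h3
      simp only [List.sum_append]
      push_cast
      linarith

theorem feas_cap {m : Int} : ∀ (j : Nat) (l : List Int), feasN m j l →
    feasN m (min j l.length) l := by
  intro j
  induction j with
  | zero => intro l h; subst h; simp [feasN]
  | succ j ih =>
    intro l h
    rcases h with h | ⟨l1, l2, rfl, h1, h2, h3⟩
    · subst h; exact feas_nil m _
    · have ih2 := ih l2 h3
      have hgoal : feasN m (min j l2.length + 1) (l1 ++ l2) :=
        Or.inr ⟨l1, l2, rfl, h1, h2, ih2⟩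
      refine feas_mono hgoal ?_
      have : 1 ≤ l1.length := by cases l1 <;> simp_all
      simp [List.length_append]
      omega

theorem feas_one_char {m : Int} {l : List Int} : feasN m 1 l ↔ (l = [] ∨ l.sum ≤ m) := by
  constructor
  · rintro (h | ⟨l1, l2, rfl, h1, h2, h3⟩)
    · exact Or.inl h
    · have : l2 = [] := h3
      subst this
      simp_all
  · rintro (rfl | h)
    · exact feas_nil m 1
    · rcases l with _ | ⟨p, ps⟩
      · exact feas_nil m 1
      · exact Or.inr ⟨p :: ps, [], by simp, by simp, by simpa using h, rfl⟩

theorem completeA_one_le : ∀ {l : List Int} {k m cur : Int},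
    completeA l k m cur = true → 1 ≤ k := by
  intro l
  induction l with
  | nil => intro k m cur h; simpa [completeA] using h
  | cons p ps ih =>
    intro k m cur h
    simp only [completeA] at h
    split_ifs at h with h1 h2 h3 h3
    · exact ih h
    · have := ih h; omega

theorem completeA_to_feas {m : Int} : ∀ (l : List Int) (k cur : Int), (∀ p ∈ l, 0 ≤ p) →
    0 ≤ cur → cur ≤ m → completeA l k m cur = true →
    ∃ l1 l2, l = l1 ++ l2 ∧ cur + l1.sum ≤ m ∧ feasN m (k - 1).toNat l2 := by
  intro l
  induction l with
  | nil =>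
    intro k cur _ _ hcm h
    exact ⟨[], [], by simp, by simpa using hcm, feas_nil m _⟩
  | cons p ps ih =>
    intro k cur hn hc hcm h
    have hp : 0 ≤ p := hn p (by simp)
    have hps : ∀ q ∈ ps, 0 ≤ q := fun q hq => hn q (by simp [hq])
    simp only [completeA] at h
    split_ifs at h with h1 h2 h3 h3
    · -- cur + p ≤ m, k ≥ 0, recurse with cur + p
      obtain ⟨l1, l2, heq, hsum, hfeas⟩ := ih k (cur + p) hps (by omega) h2 h
      exact ⟨p :: l1, l2, by simp [heq], by simp; linarith, hfeas⟩
    · -- overflow: k - 1 ≥ 0, recurse with cur = p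
      push Not at h1
      obtain ⟨l1, l2, heq, hsum, hfeas⟩ := ih (k - 1) p hps hp (by omega) h
      have hk1 : 2 ≤ k := by
        have := completeA_one_le h
        omega
      refine ⟨[], p :: ps, by simp, by simpa using hcm, ?_⟩
      have hkn : (k - 1).toNat = (k - 1 - 1).toNat + 1 := by omega
      rw [hkn, heq]
      exact Or.inr ⟨p :: l1, l2, by simp, by simp, by simp; linarith, hfeas⟩

theorem feas_to_completeA {m : Int} : ∀ (l l1 l2 : List Int) (k cur : Int) (j : Nat),
    (∀ p ∈ l, 0 ≤ p) → 0 ≤ cur → 1 ≤ k → (j : Int) ≤ k - 1 →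
    l = l1 ++ l2 → cur + l1.sum ≤ m → feasN m j l2 → completeA l k m cur = true := by
  intro l
  induction l with
  | nil =>
    intro l1 l2 k cur j _ _ hk _ _ _ _
    simp [completeA]; omega
  | cons p ps ih =>
    intro l1 l2 k cur j hn hc hk hjk heq hsum hfeas
    have hp : 0 ≤ p := hn p (by simp)
    have hps : ∀ q ∈ ps, 0 ≤ q := fun q hq => hn q (by simp [hq])
    rcases l1 with _ | ⟨q, l1'⟩
    · -- committed group empty: l2 = p :: ps
      simp at heq hsum
      subst heq
      cases j with
      | zero => simp [feasN] at hfeas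
      | succ j' =>
        rcases hfeas with h | ⟨a, b, hab, hane, hasum, hbfeas⟩
        · simp at h
        · rcases a with _ | ⟨a0, a'⟩
          · simp at hane
          · rw [List.cons_append] at hab
            injection hab with ha0 habs
            subst ha0
            have ha' : ∀ q ∈ a', 0 ≤ q := by
              intro q hq; exact hps q (by rw [habs]; simp [hq])
            have hasum' : p + a'.sum ≤ m := by simpa using hasum
            have hpm : p ≤ m := by
              have : 0 ≤ a'.sum := List.sum_nonneg ha'
              linarith
            simp only [completeA]
            by_cases hgt : p > m
            · omega
            · rw [if_neg hgt]
              by_cases hfit : cur + p ≤ m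
              · rw [if_pos hfit, if_neg (by omega)]
                -- recurse with cur + p, same budget j
                have hfeasps : feasN m (j' + 1) ps := by
                  rcases a' with _ | ⟨r, rs⟩
                  · simp at habs; subst habs; exact feas_succ hbfeas
                  · exact Or.inr ⟨r :: rs, b, habs, by simp, by
                      simp at hasum' ⊢; linarith, hbfeas⟩
                exact ih [] ps k (cur + p) (j' + 1) hps (by omega) hk hjk rfl
                  (by simpa using hfit) hfeasps
              · rw [if_neg hfit]
                have hj1 : 1 ≤ (j' + 1 : Int) := by omega
                have hk2 : 2 ≤ k := by push_cast at hjk; omega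
                rw [if_neg (by omega)]
                exact ih a' b (k - 1) p j' hps hp (by omega) (by push_cast at hjk ⊢; omega)
                  habs (by simpa using hasum') hbfeas
    · -- committed group q :: l1', q = p
      rw [List.cons_append] at heq
      injection heq with hqp heq'
      subst hqp
      have hl1' : ∀ r ∈ l1', 0 ≤ r := by
        intro r hr; exact hps r (by rw [heq']; simp [hr])
      have hl2 : ∀ r ∈ l2, 0 ≤ r := by
        intro r hr; exact hps r (by rw [heq']; simp [hr])
      have hsum' : cur + p + l1'.sum ≤ m := by simp at hsum; linarith
      have hfit : cur + p ≤ m := by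
        have : 0 ≤ l1'.sum := List.sum_nonneg hl1'
        linarith
      simp only [completeA]
      rw [if_neg (by omega), if_pos hfit, if_neg (by omega)]
      exact ih l1' l2 k (cur + p) j hps (by omega) hk hjk heq' hsum' hfeas

theorem bridgeA {m k : Int} {pages : List Int} (hne : pages ≠ []) (hn : ∀ p ∈ pages, 0 ≤ p)
    (hm : 0 ≤ m) (hk : 1 ≤ k) : completeA pages k m 0 = true ↔ feasN m k.toNat pages := by
  constructor
  · intro h
    obtain ⟨l1, l2, heq, hsum, hfeas⟩ := completeA_to_feas pages k 0 hn le_rfl hm h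
    have hkn : k.toNat = (k - 1).toNat + 1 := by omega
    rw [hkn]
    rcases l1 with _ | ⟨q, l1'⟩
    · simp at heq; subst heq; exact feas_succ hfeas
    · exact Or.inr ⟨q :: l1', l2, heq, by simp, by simpa using hsum, hfeas⟩
  · intro h
    have hkn : k.toNat = (k.toNat - 1) + 1 := by omega
    rw [hkn] at h
    rcases h with h | ⟨l1, l2, heq, hne1, hsum, hfeas⟩
    · exact absurd h hne
    · exact feas_to_completeA pages l1 l2 k 0 (k.toNat - 1) hn le_rfl hk (by omega) heq
        (by simpa using hsum) hfeas

-- dp rows: dps are the DP values of the successive suffixes of l, with j persons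
def RowOK (j : Nat) : List Int → List Int → Prop
  | [], dps => dps = [0]
  | p :: ps, dps => ∃ d ds, dps = d :: ds ∧ 0 ≤ d ∧
      (∀ m : Int, 0 ≤ m → (d ≤ m ↔ feasN m j (p :: ps))) ∧ RowOK j ps ds

theorem sufsB_head (l : List Int) : (sufsB l).headI = l.sum := by
  induction l with
  | nil => simp [sufsB]
  | cons p ps ih => simp [sufsB, ih]

theorem sufs_ok {l : List Int} (hn : ∀ p ∈ l, 0 ≤ p) : RowOK 1 l (sufsB l) := by
  induction l with
  | nil => simp [sufsB, RowOK]
  | cons p ps ih =>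
    have hps : ∀ q ∈ ps, 0 ≤ q := fun q hq => hn q (by simp [hq])
    refine ⟨p + (sufsB ps).headI, sufsB ps, rfl, ?_, ?_, ih hps⟩
    · rw [sufsB_head]
      have := List.sum_nonneg hps
      have := hn p (by simp)
      linarith
    · intro m _
      rw [sufsB_head, feas_one_char]
      simp

-- the list of candidate values scanned by innerB
def candsB (cur : Int) : List Int → List Int → List Int
  | p :: ps, d :: ds => max (cur + p) d :: candsB (cur + p) ps ds
  | _, _ => []

def omlist (best : Option Int) : List Int → Option Int
  | [] => best
  | c :: cs => omlist (ominB best c) cs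

theorem innerB_eq : ∀ (ps ds : List Int) (cur : Int) (best : Option Int),
    innerB cur best ps ds = omlist best (candsB cur ps ds) := by
  intro ps
  induction ps with
  | nil => intro ds cur best; cases ds <;> simp [innerB, candsB, omlist]
  | cons p ps ih =>
    intro ds cur best
    cases ds with
    | nil => simp [innerB, candsB, omlist]
    | cons d ds => simp [innerB, candsB, omlist, ih]

theorem foldl_min_mem : ∀ (cs : List Int) (b0 : Int),
    cs.foldl min b0 = b0 ∨ cs.foldl min b0 ∈ cs := by
  intro cs
  induction cs with
  | nil => intro b0; simp
  | cons c cs ih =>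
    intro b0
    rcases ih (min b0 c) with h | h
    · rcases min_choice b0 c with hm | hm
      · exact Or.inl (by simp [List.foldl]; omega)
      · refine Or.inr (by simp [List.foldl]; left; omega)
    · exact Or.inr (by simp [List.foldl]; right; exact h)

theorem foldl_min_le_iff : ∀ (cs : List Int) (b0 m : Int),
    cs.foldl min b0 ≤ m ↔ b0 ≤ m ∨ ∃ c ∈ cs, c ≤ m := by
  intro cs
  induction cs with
  | nil => intro b0 m; simp
  | cons c cs ih =>
    intro b0 m
    simp only [List.foldl, ih, min_le_iff, List.mem_cons]
    constructor
    · rintro ((h | h) | ⟨c', hc', h⟩)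
      · exact Or.inl h
      · exact Or.inr ⟨c, Or.inl rfl, h⟩
      · exact Or.inr ⟨c', Or.inr hc', h⟩
    · rintro (h | ⟨c', (rfl | hc'), h⟩)
      · exact Or.inl (Or.inl h)
      · exact Or.inl (Or.inr h)
      · exact Or.inr ⟨c', hc', h⟩

theorem ominB_some (b0 c : Int) : ominB (some b0) c = some (min b0 c) := by
  simp only [ominB]
  split_ifs with h <;> simp <;> omega

theorem omlist_some_val : ∀ (cs : List Int) (b0 : Int),
    omlist (some b0) cs = some (cs.foldl min b0) := by
  intro cs
  induction cs with
  | nil => intro b0; rfl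
  | cons c cs ih => intro b0; simp only [omlist, ominB_some, ih, List.foldl]

theorem omlist_mem : ∀ (cs : List Int) (best : Option Int) (b : Int),
    omlist best cs = some b → b ∈ cs ∨ best = some b := by
  rintro cs (_ | b0) b h
  · cases cs with
    | nil => simp [omlist] at h
    | cons c cs =>
      have : omlist (some c) cs = some b := h
      rw [omlist_some_val] at this
      injection this with hb
      rcases foldl_min_mem cs c with hm | hm
      · exact Or.inl (by simp [← hb, hm])
      · exact Or.inl (by simp [← hb]; right; exact hm)
  · rw [omlist_some_val] at h
    injection h with hb
    rcases foldl_min_mem cs b0 with hm | hm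
    · exact Or.inr (by rw [← hb, hm])
    · exact Or.inl (by rw [← hb]; exact hm)

theorem omlist_char : ∀ (cs : List Int) (best : Option Int) (b : Int),
    omlist best cs = some b → ∀ m : Int,
    (b ≤ m ↔ (∃ c ∈ cs, c ≤ m) ∨ (∃ b0, best = some b0 ∧ b0 ≤ m)) := by
  rintro cs (_ | b0) b h m
  · cases cs with
    | nil => simp [omlist] at h
    | cons c cs =>
      have : omlist (some c) cs = some b := h
      rw [omlist_some_val] at this
      injection this with hb
      rw [← hb, foldl_min_le_iff]
      simp [List.mem_cons]
  · rw [omlist_some_val] at h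
    injection h with hb
    rw [← hb, foldl_min_le_iff]
    constructor
    · rintro (h1 | h1)
      · exact Or.inr ⟨b0, rfl, h1⟩
      · exact Or.inl h1
    · rintro (h1 | ⟨b1, hb1, h1⟩)
      · exact Or.inr h1
      · injection hb1 with hb1; subst hb1; exact Or.inl h1

theorem omlist_isSome : ∀ (cs : List Int) (b0 : Int), ∃ b, omlist (some b0) cs = some b := by
  intro cs b0
  exact ⟨cs.foldl min b0, omlist_some_val cs b0⟩

theorem rowok_nonneg {j : Nat} : ∀ {l dps : List Int}, RowOK j l dps → ∀ d ∈ dps, 0 ≤ d := by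
  intro l
  induction l with
  | nil => intro dps h d hd; simp [RowOK] at h; subst h; simp at hd; omega
  | cons p ps ih =>
    intro dps h d hd
    obtain ⟨d0, ds, rfl, hd0, _, hrec⟩ := h
    rcases List.mem_cons.mp hd with rfl | hd'
    · omega
    · exact ih hrec d hd'

theorem rowok_ne_nil {j : Nat} : ∀ {l dps : List Int}, RowOK j l dps → dps ≠ [] := by
  intro l
  cases l with
  | nil => intro dps h; simp [RowOK] at h; simp [h]
  | cons p ps =>
    intro dps h
    obtain ⟨d0, ds, rfl, _⟩ := h
    simp

theorem cands_nonneg : ∀ (ps ds : List Int) (cur : Int), (∀ p ∈ ps, 0 ≤ p) → 0 ≤ cur →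
    (∀ d ∈ ds, 0 ≤ d) → ∀ c ∈ candsB cur ps ds, 0 ≤ c := by
  intro ps
  induction ps with
  | nil => intro ds cur _ _ _ c hc; simp [candsB] at hc
  | cons p ps ih =>
    intro ds cur hn hcur hds c hc
    cases ds with
    | nil => simp [candsB] at hc
    | cons d ds =>
      simp only [candsB] at hc
      rcases List.mem_cons.mp hc with hc | hc
      · have := hn p (by simp)
        have := hds d (by simp)
        simp [hc]; omega
      · exact ih ds (cur + p) (fun q hq => hn q (by simp [hq])) (by
          have := hn p (by simp); omega) (fun e he => hds e (by simp [he])) c hc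

theorem cands_iff {m : Int} {j : Nat} (hm : 0 ≤ m) : ∀ (qs : List Int) (q : Int)
    (ds : List Int) (cur : Int), RowOK j qs ds → (∀ p ∈ q :: qs, 0 ≤ p) → 0 ≤ cur →
    ((∃ c ∈ candsB cur (q :: qs) ds, c ≤ m) ↔
      ∃ l1 l2, q :: qs = l1 ++ l2 ∧ l1 ≠ [] ∧ cur + l1.sum ≤ m ∧ feasN m j l2) := by
  intro qs
  induction qs with
  | nil =>
    intro q ds cur hrow hn hcur
    have hds : ds = [0] := hrow
    subst hds
    simp only [candsB]
    constructor
    · rintro ⟨c, hc, hcm⟩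
      rcases List.mem_cons.mp hc with rfl | hc'
      · refine ⟨[q], [], by simp, by simp, ?_, feas_nil m j⟩
        simp at hcm
        simpa using hcm.1
      · simp at hc'
    · rintro ⟨l1, l2, heq, hne1, hsum, _⟩
      refine ⟨max (cur + q) 0, by simp, ?_⟩
      rcases l1 with _ | ⟨x, l1'⟩
      · simp at hne1
      · rw [List.cons_append] at heq
        injection heq with hx htail
        subst hx
        have : l1' = [] := by
          rcases l1' with _ | ⟨y, l1''⟩
          · rfl
          · exfalso; simp at htail
        subst this
        simp at hsum ⊢
        omega
  | cons r rs ih =>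
    intro q ds cur hrow hn hcur
    obtain ⟨d, ds', rfl, hd0, hdiff, hrec⟩ := hrow
    have hq : 0 ≤ q := hn q (by simp)
    simp only [candsB]
    have hih := ih r ds' (cur + q) hrec (fun p hp => hn p (by simp at hp ⊢; tauto))
      (by omega)
    constructor
    · rintro ⟨c, hc, hcm⟩
      rcases List.mem_cons.mp hc with rfl | hc'
      · -- first candidate: l1 = [q], rest r :: rs with j persons
        simp at hcm
        exact ⟨[q], r :: rs, by simp, by simp, by simpa using hcm.1,
          (hdiff m hm).mp hcm.2⟩
      · obtain ⟨l1, l2, heq, hne1, hsum, hfeas⟩ := hih.mp ⟨c, hc', hcm⟩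
        exact ⟨q :: l1, l2, by simp [heq], by simp, by
          simp at hsum ⊢; linarith, hfeas⟩
    · rintro ⟨l1, l2, heq, hne1, hsum, hfeas⟩
      rcases l1 with _ | ⟨x, l1'⟩
      · simp at hne1
      · rw [List.cons_append] at heq
        injection heq with hx htail
        subst hx
        rcases l1' with _ | ⟨y, l1''⟩
        · -- l1 = [q]: first candidate
          simp at htail
          subst htail
          refine ⟨max (cur + q) d, by simp, ?_⟩
          have : d ≤ m := (hdiff m hm).mpr hfeas
          simp at hsum ⊢
          omega
        · -- l1 = q :: y :: l1'': inner candidates via ih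
          obtain ⟨c, hc', hcm⟩ := hih.mpr ⟨y :: l1'', l2, htail, by simp, by
            simp at hsum ⊢; linarith, hfeas⟩
          exact ⟨c, List.mem_cons_of_mem _ hc', hcm⟩

theorem rowok_step {j : Nat} : ∀ {l dps : List Int}, (∀ p ∈ l, 0 ≤ p) → RowOK j l dps →
    RowOK (j + 1) l (rowB l dps ++ [0]) := by
  intro l
  induction l with
  | nil => intro dps _ _; simp [rowB, RowOK]
  | cons p ps ih =>
    intro dps hn hrow
    obtain ⟨d, ds, rfl, hd0, hdiff, hrec⟩ := hrow
    have hps : ∀ q ∈ ps, 0 ≤ q := fun q hq => hn q (by simp [hq])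
    have hds : (d :: ds).tail = ds := rfl
    simp only [rowB, hds, List.cons_append]
    -- the inner minimum exists
    have hcands : ∃ c0 cs0, candsB 0 (p :: ps) ds = c0 :: cs0 := by
      have hdsne : ds ≠ [] := rowok_ne_nil hrec
      rcases ds with _ | ⟨d0, ds'⟩
      · exact absurd rfl hdsne
      · exact ⟨_, _, rfl⟩
    obtain ⟨c0, cs0, hc0⟩ := hcands
    have hsome : ∃ b, innerB 0 none (p :: ps) ds = some b := by
      rw [innerB_eq, hc0]
      simp only [omlist, ominB]
      exact omlist_isSome cs0 c0
    obtain ⟨b, hb⟩ := hsome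
    refine ⟨b, rowB ps ds ++ [0], by rw [hb]; rfl, ?_, ?_, ih hps hrec⟩
    · -- 0 ≤ b
      have hmem : b ∈ candsB 0 (p :: ps) ds := by
        rw [innerB_eq] at hb
        rcases omlist_mem _ _ _ hb with h | h
        · exact h
        · exact absurd h (by simp)
      exact cands_nonneg (p :: ps) ds 0 hn le_rfl (rowok_nonneg hrec) b hmem
    · intro m hm
      have hchar := omlist_char _ _ _ (by rw [← innerB_eq]; exact hb) m
      have hiff := cands_iff hm ps p ds 0 hrec hn le_rfl
      rw [hchar]
      show _ ↔ feasN m (j + 1) (p :: ps)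
      constructor
      · rintro (h | ⟨b0, h, _⟩)
        · obtain ⟨l1, l2, heq, hne1, hsum, hfeas⟩ := hiff.mp h
          exact Or.inr ⟨l1, l2, heq, hne1, by simpa using hsum, hfeas⟩
        · exact absurd h (by simp)
      · rintro (h | ⟨l1, l2, heq, hne1, hsum, hfeas⟩)
        · exact absurd h (by simp)
        · exact Or.inl (hiff.mpr ⟨l1, l2, heq, hne1, by simpa using hsum, hfeas⟩)

theorem foldl_const {α β : Type} : ∀ (xs : List α) (g : β → β) (init : β),
    xs.foldl (fun s _ => g s) init = g^[xs.length] init := by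
  intro xs
  induction xs with
  | nil => intro g init; rfl
  | cons x xs ih =>
    intro g init
    simp only [List.foldl, List.length_cons, ih, Function.iterate_succ_apply]

theorem iter_ok {l : List Int} (hn : ∀ p ∈ l, 0 ≤ p) :
    ∀ t : Nat, RowOK (t + 1) l ((stepB l)^[t] (sufsB l)) := by
  intro t
  induction t with
  | zero => exact sufs_ok hn
  | succ t ih =>
    rw [Function.iterate_succ_apply']
    exact rowok_step hn ih

theorem bs_formula {pages : List Int} {k v : Int}
    (hP : ∀ m : Int, completeA pages k m 0 = true ↔ v ≤ m) :
    ∀ (N : Nat) (l r : Int), (r + 1 - l).toNat ≤ N → l ≤ r + 1 →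
    bsA pages k l r = max l (min v (r + 1)) := by
  intro N
  induction N with
  | zero =>
    intro l r hN hlr
    have : l = r + 1 := by omega
    subst this
    rw [bsA, dif_neg (by omega : ¬ (r + 1 ≤ r))]
    omega
  | succ N ih =>
    intro l r hN hlr
    by_cases hle : l ≤ r
    · rw [bsA, dif_pos hle]
      have h2 : PySem.Int.floordiv (r - l) 2 = (r - l) / 2 :=
        PySem.Int.floordiv_eq_ediv_of_pos (by norm_num)
      rw [h2]
      have hmid1 : l ≤ l + (r - l) / 2 := by omega
      have hmid2 : l + (r - l) / 2 ≤ r := by omega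
      by_cases hc : completeA pages k (l + (r - l) / 2) 0 = true
      · rw [if_pos hc]
        have hv : v ≤ l + (r - l) / 2 := (hP _).mp hc
        rw [ih l (l + (r - l) / 2 - 1) (by omega) (by omega)]
        omega
      · rw [if_neg hc]
        have hv : ¬ v ≤ l + (r - l) / 2 := fun h => hc ((hP _).mpr h)
        rw [ih (l + (r - l) / 2 + 1) r (by omega) (by omega)]
        omega
    · rw [bsA, dif_neg hle]
      omega

theorem bs_upper {pages : List Int} {k : Int} :
    ∀ (N : Nat) (l r : Int), (r + 1 - l).toNat ≤ N → l ≤ r + 1 →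
    bsA pages k l r ≤ r + 1 := by
  intro N
  induction N with
  | zero =>
    intro l r hN hlr
    have : l = r + 1 := by omega
    subst this
    rw [bsA, dif_neg (by omega : ¬ (r + 1 ≤ r))]
  | succ N ih =>
    intro l r hN hlr
    by_cases hle : l ≤ r
    · rw [bsA, dif_pos hle]
      have h2 : PySem.Int.floordiv (r - l) 2 = (r - l) / 2 :=
        PySem.Int.floordiv_eq_ediv_of_pos (by norm_num)
      rw [h2]
      have hmid1 : l ≤ l + (r - l) / 2 := by omega
      have hmid2 : l + (r - l) / 2 ≤ r := by omega
      by_cases hc : completeA pages k (l + (r - l) / 2) 0 = true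
      · rw [if_pos hc]
        have := ih l (l + (r - l) / 2 - 1) (by omega) (by omega)
        omega
      · rw [if_neg hc]
        exact ih (l + (r - l) / 2 + 1) r (by omega) (by omega)
    · rw [bsA, dif_neg hle]
      omega

theorem sufsB_length (l : List Int) : (sufsB l).length = l.length + 1 := by
  induction l with
  | nil => rfl
  | cons p ps ih => simp [sufsB, ih]

theorem sufsB_getLast (l : List Int) : (sufsB l).getLast? = some 0 := by
  induction l with
  | nil => rfl
  | cons p ps ih =>
    rcases h : sufsB ps with _ | ⟨y, ys⟩
    · have := sufsB_length ps
      rw [h] at this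
      simp at this
    · rw [h] at ih
      simp only [sufsB, h, List.getLast?_cons_cons]
      exact ih

theorem rowB_length : ∀ (l dp : List Int), (rowB l dp).length = l.length := by
  intro l
  induction l with
  | nil => intro dp; rfl
  | cons p ps ih => intro dp; simp [rowB, ih]

theorem iterP2 {pages : List Int} : ∀ t : Nat,
    ((stepB pages)^[t] (sufsB pages)).length = pages.length + 1 ∧
    ((stepB pages)^[t] (sufsB pages)).getLast? = some 0 := by
  intro t
  induction t with
  | zero => exact ⟨sufsB_length pages, sufsB_getLast pages⟩
  | succ t ih =>
    rw [Function.iterate_succ_apply']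
    constructor
    · simp [stepB, rowB_length]
    · simp [stepB]

theorem cands_last : ∀ (ps ds : List Int) (cur d : Int), ps ≠ [] →
    ds.length = ps.length → ds.getLast? = some d →
    max (cur + ps.sum) d ∈ candsB cur ps ds := by
  intro ps
  induction ps with
  | nil => intro ds cur d h; exact absurd rfl h
  | cons p ps ih =>
    intro ds cur d _ hlen hlast
    rcases ds with _ | ⟨d0, ds'⟩
    · simp at hlen
    · rcases ps with _ | ⟨r, rs⟩
      · have hds' : ds' = [] := by simp at hlen; simpa using hlen
        subst hds'
        simp at hlast
        subst hlast
        simp [candsB]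
      · have hds' : ds' ≠ [] := by
          simp at hlen
          intro h; rw [h] at hlen; simp at hlen
        rcases hd : ds' with _ | ⟨e0, es⟩
        · exact absurd hd hds'
        · rw [hd] at hlast
          rw [List.getLast?_cons_cons] at hlast
          have hm := ih (e0 :: es) (cur + p) d (by simp) (by
            rw [← hd]; simp at hlen ⊢; omega) hlast
          simp only [candsB]
          refine List.mem_cons_of_mem _ ?_
          have : cur + (p :: r :: rs).sum = cur + p + (r :: rs).sum := by simp; ring
          rw [this]
          exact hm

theorem step_head_le {p : Int} {ps dp : List Int} (hlen : dp.length = (p :: ps).length + 1)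
    (hlast : dp.getLast? = some 0) (hsum : (p :: ps).sum ≤ 0) :
    (stepB (p :: ps) dp).headI ≤ 0 := by
  rcases dp with _ | ⟨d0, rest⟩
  · simp at hlen
  rcases rest with _ | ⟨r0, rrest⟩
  · simp at hlen
  · have hrlen : (r0 :: rrest).length = (p :: ps).length := by simpa using hlen
    have hrlast : (r0 :: rrest).getLast? = some 0 := by
      rw [List.getLast?_cons_cons] at hlast
      exact hlast
    have hmem : max (0 + (p :: ps).sum) 0 ∈ candsB 0 (p :: ps) (r0 :: rrest) :=
      cands_last (p :: ps) (r0 :: rrest) 0 0 (by simp) hrlen hrlast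
    have hcle : max (0 + (p :: ps).sum) 0 ≤ 0 := by omega
    -- the head of the new row is the minimum of the candidates
    have htail : (d0 :: r0 :: rrest).tail = r0 :: rrest := rfl
    simp only [stepB, rowB, htail, List.cons_append, List.headI]
    rw [innerB_eq]
    rcases hc : candsB 0 (p :: ps) (r0 :: rrest) with _ | ⟨c0, cs0⟩
    · rw [hc] at hmem; simp at hmem
    · have hsome : omlist none (c0 :: cs0) = some (cs0.foldl min c0) := by
        simp only [omlist, ominB]
        exact omlist_some_val cs0 c0
      rw [hsome]
      simp only [Option.getD_some]
      have := omlist_char (c0 :: cs0) none _ hsome 0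
      rw [this]
      rw [hc] at hmem
      exact Or.inl ⟨_, hmem, hcle⟩

-- ===== VERDICT (by name: the statement is the Claim_ definition above) =====
theorem copyBooks_spec : Claim_equal_copyBooks := by
  intro pages k _hdom hpre
  unfold Spec_copyBooks
  by_cases hne : pages = []
  · subst hne; simp [copyBooks, copyBooks_alt]
  · rcases hpre with hnil | ⟨hk, hcase⟩
    · exact absurd hnil hne
    rcases hcase with hn | hsum0
    · -- natural domain: nonnegative pages, k ≥ 1
      have hlen1 : 1 ≤ pages.length := by
        rcases pages with _ | ⟨p, ps⟩
        · exact absurd rfl hne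
        · simp
      set persons := min k (pages.length : Int) with hpersons
      have hpers1 : 1 ≤ persons := by
        simp only [hpersons]
        omega
      set t := (persons - 1).toNat with ht
      have hiter := iter_ok hn t
      have htn : t + 1 = persons.toNat := by omega
      rw [htn] at hiter
      -- read off the head of the final dp row
      obtain ⟨d, ds, hdp, hd0, hdchar, _⟩ : ∃ d ds,
          (stepB pages)^[t] (sufsB pages) = d :: ds ∧ 0 ≤ d ∧
          (∀ m : Int, 0 ≤ m → (d ≤ m ↔ feasN m persons.toNat pages)) ∧ True := by
        rcases hpag : pages with _ | ⟨p, ps⟩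
        · exact absurd hpag hne
        · rw [hpag] at hiter
          obtain ⟨d, ds, hdps, hd0, hdiff, _⟩ := hiter
          exact ⟨d, ds, hdps, hd0, by rw [← hpag] at hdiff ⊢; exact hdiff, trivial⟩
      -- the capped DP row decides exactly the greedy feasibility check of A
      have hcapn : persons.toNat = min k.toNat pages.length := by omega
      have hcap : ∀ m : Int, feasN m k.toNat pages ↔ feasN m persons.toNat pages := by
        intro m
        constructor
        · intro h
          rw [hcapn]
          exact feas_cap k.toNat pages h
        · intro h
          exact feas_mono h (by omega)
      have hP : ∀ m : Int, completeA pages k m 0 = true ↔ d ≤ m := by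
        intro m
        by_cases hm : 0 ≤ m
        · rw [bridgeA hne hn hm hk, hcap m, hdchar m hm]
        · constructor
          · intro hc
            exfalso
            rcases hpag : pages with _ | ⟨p, ps⟩
            · exact hne hpag
            · rw [hpag] at hc
              have hp : 0 ≤ p := hn p (by rw [hpag]; simp)
              simp only [completeA] at hc
              rw [if_pos (by omega)] at hc
              exact Bool.false_ne_true hc
          · intro hdm; omega
      -- bounds for the binary-search window
      have htot0 : 0 ≤ pages.sum := List.sum_nonneg hn
      have hvtot : d ≤ pages.sum := by
        refine (hdchar pages.sum htot0).mpr ?_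
        have hpn : persons.toNat = (persons.toNat - 1) + 1 := by omega
        rw [hpn]
        exact Or.inr ⟨pages, [], by simp, hne, by simp, feas_nil _ _⟩
      have hlv : (if PySem.Int.mod pages.sum k = 0 then PySem.Int.floordiv pages.sum k
          else PySem.Int.floordiv pages.sum k + 1) ≤ d := by
        have hf : feasN d persons.toNat pages := (hdchar d hd0).mp le_rfl
        have hsb : pages.sum ≤ (persons.toNat : Int) * d := feas_sum hd0 persons.toNat pages hn hf
        have hcast : (persons.toNat : Int) = persons := by omega
        rw [hcast] at hsb
        have hkd : persons * d ≤ k * d := mul_le_mul_of_nonneg_right (min_le_left _ _) hd0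
        have htkd : pages.sum ≤ k * d := le_trans hsb hkd
        have hdm := PySem.Int.floordiv_mul_add_mod pages.sum k
        have hmod : PySem.Int.mod pages.sum k = pages.sum % k :=
          PySem.Int.mod_eq_emod_of_pos (by omega)
        have hm0 : 0 ≤ pages.sum % k := Int.emod_nonneg _ (by omega)
        have hmk : pages.sum % k < k := Int.emod_lt_of_pos _ (by omega)
        set q := PySem.Int.floordiv pages.sum k with hq
        rw [hmod] at hdm
        have hcomm : q * k = k * q := mul_comm _ _
        split_ifs with hz
        · rw [hmod] at hz
          by_contra hqd
          push Not at hqd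
          have hstep : k * (d + 1) ≤ k * q := mul_le_mul_of_nonneg_left (by omega) (by omega)
          have hexp : k * (d + 1) = k * d + k := by ring
          linarith
        · rw [hmod] at hz
          by_contra hqd
          push Not at hqd
          have hmpos : 0 < pages.sum % k := by omega
          have hstep : k * d ≤ k * q := mul_le_mul_of_nonneg_left (by omega) (by omega)
          linarith
      -- evaluate A
      have hA : copyBooks pages k = max d 1 := by
        simp only [copyBooks, if_neg hne]
        have hbs := bs_formula hP (pages.sum + 1 - (if PySem.Int.mod pages.sum k = 0 then
            PySem.Int.floordiv pages.sum k else PySem.Int.floordiv pages.sum k + 1)).toNat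
          _ pages.sum le_rfl (by omega)
        rw [hbs]
        omega
      -- evaluate B
      have hB : copyBooks_alt pages k = max d 1 := by
        simp only [copyBooks_alt, if_neg hne]
        have hlen : (PySem.List.pyRange 0 (persons - 1) 1).length = t := by
          rw [PySem.List.length_pyRange_one]
          omega
        rw [← hpersons, foldl_const, hlen, hdp]
        simp
      rw [hA, hB]
    · -- nonpositive total: both programs return 1
      have hA1 : copyBooks pages k = 1 := by
        simp only [copyBooks, if_neg hne]
        have hdm := PySem.Int.floordiv_mul_add_mod pages.sum k
        have hmod : PySem.Int.mod pages.sum k = pages.sum % k :=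
          PySem.Int.mod_eq_emod_of_pos (by omega)
        have hm0 : 0 ≤ pages.sum % k := Int.emod_nonneg _ (by omega)
        have hmk : pages.sum % k < k := Int.emod_lt_of_pos _ (by omega)
        set q := PySem.Int.floordiv pages.sum k with hq
        rw [hmod] at hdm
        have hq0 : q ≤ 0 := by
          by_contra hqpos
          push Not at hqpos
          have hstep : 1 * k ≤ q * k := mul_le_mul_of_nonneg_right (by omega) (by omega)
          have hone : 1 * k = k := one_mul k
          linarith
        have hqne0 : PySem.Int.mod pages.sum k ≠ 0 → q ≠ 0 := by
          intro hz h0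
          rw [hmod] at hz
          rw [h0] at hdm
          simp at hdm
          omega
        have hleft0 : (if PySem.Int.mod pages.sum k = 0 then q else q + 1) ≤ 0 := by
          split_ifs with hz
          · omega
          · have := hqne0 hz
            omega
        by_cases hlr : (if PySem.Int.mod pages.sum k = 0 then q else q + 1) ≤ pages.sum
        · have hup := bs_upper (pages := pages) (k := k)
            ((pages.sum + 1 - (if PySem.Int.mod pages.sum k = 0 then q else q + 1)).toNat)
            (if PySem.Int.mod pages.sum k = 0 then q else q + 1) pages.sum le_rfl (by omega)
          omega
        · rw [bsA, dif_neg (by omega)]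
          omega
      have hB1 : copyBooks_alt pages k = 1 := by
        simp only [copyBooks_alt, if_neg hne]
        have hlen : (PySem.List.pyRange 0 (min k (pages.length : Int) - 1) 1).length =
            (min k (pages.length : Int) - 1).toNat := by
          rw [PySem.List.length_pyRange_one]
          omega
        rw [foldl_const, hlen]
        set t := (min k (pages.length : Int) - 1).toNat with ht
        have hhead : ((stepB pages)^[t] (sufsB pages)).headI ≤ 0 := by
          cases t with
          | zero =>
            rw [Function.iterate_zero_apply, sufsB_head]
            exact hsum0
          | succ t' =>
            rw [Function.iterate_succ_apply']
            obtain ⟨hl2, hlast2⟩ := iterP2 (pages := pages) t'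
            rcases hpag : pages with _ | ⟨p, ps⟩
            · exact absurd hpag hne
            · have hs' : (p :: ps).sum ≤ 0 := by rw [hpag] at hsum0; exact hsum0
              rw [hpag] at hl2 hlast2
              exact step_head_le hl2 hlast2 hs'
        omega
      rw [hA1, hB1]
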